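-- pv_equiv track=rewrite | github.com/miliar/Code_Jam_Webscraper | Solutions_python/Problem_35/389.py | initFlow
-- ===== SOURCE A (Python) =====
-- def findDown(y, x, alMap):
--     minimum = alMap[y][x]
--     direct = ''
--
--     try:
--         if y != 0 and alMap[y-1][x] < alMap[y][x]:
--             minimum = alMap[y-1][x]
--             direct = 'N'
--     except IndexError:
--         pass
--
--     try:
--         if x != 0 and alMap[y][x-1] < minimum:
--             minimum = alMap[y][x-1]
--             direct = 'W'
--     except IndexError:
--         pass
--
--     try:
--         if alMap[y][x+1] < minimum:
--             minimum = alMap[y][x+1]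
--             direct = 'E'
--     except IndexError:
--         pass
--
--     try:
--         if alMap[y+1][x] < minimum:
--             minimum = alMap[y+1][x]
--             direct = 'S'
--     except IndexError:
--         pass
--
--     return direct
--
-- def initFlow(y, x, label, alMap, result):
--     stack = []
--
--     while 1:
--         stack.append((y,x))
--         direct = findDown(y, x, alMap)
--
--         if direct == '':
--             break
--
--         if direct == 'N':
--             y = y - 1
--         elif direct == 'W':
--             x = x - 1
--         elif direct == 'E':
--             x = x + 1
--         else:
--             y = y + 1
--
--         if result[y][x] != '':
--             for cord in stack:
--                 result[cord[0]][cord[1]] = result[y][x]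
--
--             return label
--
--     for cord in stack:
--         result[cord[0]][cord[1]] = label
--
--     return chr(ord(label)+1)
-- ===== SOURCE B (Python) =====
-- # candidate-list findDown + recursive unwind labeling
-- def _cell(alMap, i, j):
--     try:
--         return alMap[i][j]
--     except IndexError:
--         return None
--
-- def _findDown(y, x, alMap):
--     cands = []
--     for prio, (d, i, j) in enumerate((('N', y - 1, x), ('W', y, x - 1), ('E', y, x + 1), ('S', y + 1, x))):
--         if (d == 'N' and y == 0) or (d == 'W' and x == 0):
--             continue
--         v = _cell(alMap, i, j)
--         if v is not None:
--             cands.append((v, prio, d))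
--     if not cands:
--         return ''
--     v, _, d = min(cands)
--     return d if v < alMap[y][x] else ''
--
-- def _step(y, x, d):
--     if d == 'N':
--         return (y - 1, x)
--     if d == 'W':
--         return (y, x - 1)
--     if d == 'E':
--         return (y, x + 1)
--     return (y + 1, x)
--
-- def initFlow(y, x, label, alMap, result):
--     d = _findDown(y, x, alMap)
--     if d == '':
--         result[y][x] = label
--         return chr(ord(label) + 1)
--     ny, nx = _step(y, x, d)
--     if result[ny][nx] != '':
--         result[y][x] = result[ny][nx]
--         return label
--     out = initFlow(ny, nx, label, alMap, result)
--     result[y][x] = result[ny][nx]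
--     return out
-- ===== Notes on version B (the rewrite author's own statement) =====
-- stated objective: alternative
-- what changed: findDown's four sequential try/except running-minimum blocks become a candidate-list comprehension resolved by one lexicographic min(), and the iterative while-loop with an explicit stack that stamps labels at the end becomes a recursion that steps downstream and writes each cell's label on unwind.
-- outside the precondition, e.g. on initFlow(0, 0, 'ab', [[2, 1]], [['', 'z']]): A returns 'ab', B returns 'ab'; on initFlow(-1, 0, 'a', [[5]], [[''], ['x']]): A returns 'b', B returns 'b'
import Mathlib
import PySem

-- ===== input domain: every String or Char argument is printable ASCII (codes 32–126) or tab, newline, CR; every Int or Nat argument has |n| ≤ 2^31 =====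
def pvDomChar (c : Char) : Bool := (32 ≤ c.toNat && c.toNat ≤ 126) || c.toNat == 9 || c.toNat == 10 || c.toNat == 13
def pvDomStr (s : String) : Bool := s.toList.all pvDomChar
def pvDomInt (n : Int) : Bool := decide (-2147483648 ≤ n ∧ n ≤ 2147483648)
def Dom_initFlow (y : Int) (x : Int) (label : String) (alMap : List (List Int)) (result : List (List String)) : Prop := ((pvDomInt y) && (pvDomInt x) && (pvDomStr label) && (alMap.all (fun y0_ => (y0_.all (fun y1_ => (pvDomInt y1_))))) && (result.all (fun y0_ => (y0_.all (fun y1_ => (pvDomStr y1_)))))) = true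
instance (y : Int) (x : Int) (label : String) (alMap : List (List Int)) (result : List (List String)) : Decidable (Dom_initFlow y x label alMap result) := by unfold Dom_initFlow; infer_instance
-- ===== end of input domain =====

-- B re-decomposes A: findDown becomes a candidate-list + min, and the iterative stack-stamping loop
-- becomes a recursion that labels on unwind; equivalence proved for the RETURN value (both Pythons
-- mutate `result` in the same way, which is not modelled here).

-- shared helpers: both Pythons contain these exact expressions
-- chr(ord(label)+1) for a one-character `label` (multi-char labels raise TypeError: excluded by Pre_)
def pyChrOrdSucc (label : String) : String :=
  match label.toList with
  | [c] => String.ofList [Char.ofNat (c.toNat + 1)]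
  | _ => ""  -- Python raises TypeError here; excluded by Pre_

-- result[i][j] as both Pythons read it (none = IndexError; excluded by Pre_)
def pyGet2S (result : List (List String)) (i j : Int) : Option String :=
  (PySem.List.pyGet? result i).bind (fun r => PySem.List.pyGet? r j)

-- fuel for the Lean transcriptions of A's while-loop / B's recursion: one more than the number of
-- grid cells; on Pre_ inputs the flow path visits pairwise distinct cells (the altitude strictly
-- decreases along it), so the fuel is never exhausted there
def sizeFuel (alMap : List (List Int)) : Nat := alMap.foldl (fun a r => a + r.length) 0 + 1

-- ===== PORT A =====
-- alMap[i][j] with Python's try/except IndexError semantics (none = IndexError, negative wraps)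
def pyGet2 (alMap : List (List Int)) (i j : Int) : Option Int :=
  (PySem.List.pyGet? alMap i).bind (fun r => PySem.List.pyGet? r j)

def findDown (y x : Int) (alMap : List (List Int)) : String :=
  match pyGet2 alMap y x with
  | none => ""  -- Python raises IndexError on `alMap[y][x]`; excluded by Pre_
  | some c =>
    let s1 : Int × String :=
      if y ≠ 0 then
        match pyGet2 alMap (y - 1) x with
        | some v => if v < c then (v, "N") else (c, "")
        | none => (c, "")
      else (c, "")
    let s2 : Int × String :=
      if x ≠ 0 then
        match pyGet2 alMap y (x - 1) with
        | some v => if v < s1.1 then (v, "W") else s1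
        | none => s1
      else s1
    let s3 : Int × String :=
      match pyGet2 alMap y (x + 1) with
      | some v => if v < s2.1 then (v, "E") else s2
      | none => s2
    let s4 : Int × String :=
      match pyGet2 alMap (y + 1) x with
      | some v => if v < s3.1 then (v, "S") else s3
      | none => s3
    s4.2

def initFlowLoop (fuel : Nat) (stack : List (Int × Int)) (y x : Int) (label : String)
    (alMap : List (List Int)) (result : List (List String)) : String :=
  match fuel with
  | 0 => label  -- fuel guard; unreachable on Pre_ inputs
  | Nat.succ f =>
    let stack' := stack ++ [(y, x)]
    let direct := findDown y x alMap
    if direct = "" then pyChrOrdSucc label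
    else
      let yx : Int × Int :=
        if direct = "N" then (y - 1, x)
        else if direct = "W" then (y, x - 1)
        else if direct = "E" then (y, x + 1)
        else (y + 1, x)
      match pyGet2S result yx.1 yx.2 with
      | none => ""  -- Python raises IndexError on `result[y][x]`; excluded by Pre_
      | some s => if s ≠ "" then label else initFlowLoop f stack' yx.1 yx.2 label alMap result

def initFlow (y : Int) (x : Int) (label : String) (alMap : List (List Int)) (result : List (List String)) : String :=
  initFlowLoop (sizeFuel alMap) [] y x label alMap result

-- ===== PORT B =====
-- _cell(alMap, i, j): alMap[i][j] under try/except IndexError, i.e. exactly pyGet2 (shared above)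
-- _findDown: candidate list over enumerate((N,W,E,S)), then min(cands); Python's min on the
-- (value, prio, direction) 3-tuples is lexicographic and the prios are pairwise distinct, so it is
-- exactly min2? on the first two components
def findDown_alt (y x : Int) (alMap : List (List Int)) : String :=
  let quads : List (String × Int × Int) := [("N", y - 1, x), ("W", y, x - 1), ("E", y, x + 1), ("S", y + 1, x)]
  let cands : List (Int × Int × String) :=
    (PySem.List.enumerate quads 0).foldl
      (fun acc pq =>
        if (pq.2.1 = "N" ∧ y = 0) ∨ (pq.2.1 = "W" ∧ x = 0) then acc
        else
          match pyGet2 alMap pq.2.2.1 pq.2.2.2 with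
          | some v => acc ++ [(v, pq.1, pq.2.1)]
          | none => acc)
      []
  match PySem.List.min2? cands (fun t => t.1) (fun t => t.2.1) with
  | none => ""
  | some t => if t.1 < PySem.List.pyGetD (PySem.List.pyGetD alMap y []) x 0 then t.2.2 else ""
              -- `alMap[y][x]` raises for an out-of-range start in Python; excluded by Pre_

def stepB (y x : Int) (d : String) : Int × Int :=
  if d = "N" then (y - 1, x)
  else if d = "W" then (y, x - 1)
  else if d = "E" then (y, x + 1)
  else (y + 1, x)

def initFlowRec (fuel : Nat) (y x : Int) (label : String)
    (alMap : List (List Int)) (result : List (List String)) : String :=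
  match fuel with
  | 0 => label  -- fuel guard; unreachable on Pre_ inputs
  | Nat.succ f =>
    let d := findDown_alt y x alMap
    if d = "" then pyChrOrdSucc label
    else
      let p := stepB y x d
      match pyGet2S result p.1 p.2 with
      | none => ""  -- Python raises IndexError; excluded by Pre_
      | some s => if s ≠ "" then label else initFlowRec f p.1 p.2 label alMap result

def initFlow_alt (y : Int) (x : Int) (label : String) (alMap : List (List Int)) (result : List (List String)) : String :=
  initFlowRec (sizeFuel alMap) y x label alMap result

-- ===== PRECONDITION & SPEC =====
-- Pre_ restricts to the inputs where the Python A completes without an exception: the start index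
-- pair addresses a grid cell under Python indexing (negative in-range indices wrap), `label` is one
-- character (ord() raises TypeError otherwise, though A returns `label` unchecked on the merge
-- path), and `result` is large enough for every cell the flow path can touch — row-for-row at
-- least as long as alMap, with exactly alMap's row count when the start is negative (so wrapped row
-- indices stay in range; for a nonnegative start `result` may have extra rows).  A also returns on
-- some excluded inputs (a merge reached before the missing result cell / before ord(label)), which
-- B then matches; see the cites.
def Pre_initFlow (y : Int) (x : Int) (label : String) (alMap : List (List Int)) (result : List (List String)) : Prop :=
  PySem.Raise.InRange alMap.length y ∧
  PySem.Raise.InRange (PySem.List.pyGetD alMap y []).length x ∧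
  label.toList.length = 1 ∧
  ((0 ≤ y ∧ 0 ≤ x ∧ alMap.length ≤ result.length) ∨ result.length = alMap.length) ∧
  ∀ i < alMap.length, (alMap.getD i []).length ≤ (result.getD i []).length

instance (y : Int) (x : Int) (label : String) (alMap : List (List Int)) (result : List (List String)) : Decidable (Pre_initFlow y x label alMap result) := by unfold Pre_initFlow; infer_instance

def pvWitness_initFlow : Int × Int × String × List (List Int) × List (List String) :=
  (0, 0, "a", [[3, 1], [2, 4]], [["", ""], ["", ""]])

def Spec_initFlow (y : Int) (x : Int) (label : String) (alMap : List (List Int)) (result : List (List String)) (out : String) : Prop := out = initFlow_alt y x label alMap result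
instance (y : Int) (x : Int) (label : String) (alMap : List (List Int)) (result : List (List String)) (out : String) : Decidable (Spec_initFlow y x label alMap result out) := by unfold Spec_initFlow; infer_instance

-- ===== CLAIM (what is proved, stated in full; the proofs are below) =====
def Claim_equal_initFlow : Prop := ∀ (y : Int) (x : Int) (label : String) (alMap : List (List Int)) (result : List (List String)), Dom_initFlow y x label alMap result → Pre_initFlow y x label alMap result → Spec_initFlow y x label alMap result (initFlow y x label alMap result)

-- ===== LEMMAS AND PROOFS =====

-- the invariant maintained along the flow path: the current cell is readable in Python
def Readable (alMap : List (List Int)) (y x : Int) : Prop :=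
  ∃ v, pyGet2 alMap y x = some v

theorem pyGetD_eq_of_pyGet?_some {α : Type} (xs : List α) (i : Int) (d v : α)
    (h : PySem.List.pyGet? xs i = some v) : PySem.List.pyGetD xs i d = v := by
  simp [PySem.List.pyGetD, h]

theorem matchIte (c : Prop) [Decidable c] (a b : Int × Int × String) (M : Int) :
    (match (if c then some a else some b : Option (Int × Int × String)) with
      | none => ""
      | some t => if t.1 < M then t.2.2 else "") =
    (if c then (if a.1 < M then a.2.2 else "") else (if b.1 < M then b.2.2 else "")) := by
  by_cases h : c <;> simp [h]

set_option maxHeartbeats 4000000 in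
theorem findDown_eq (y x : Int) (alMap : List (List Int)) (h : Readable alMap y x) :
    findDown_alt y x alMap = findDown y x alMap := by
  obtain ⟨c, hc⟩ := h
  have hrow : ∃ row, PySem.List.pyGet? alMap y = some row := by
    unfold pyGet2 at hc
    rcases hq : PySem.List.pyGet? alMap y with _ | row
    · rw [hq] at hc; simp at hc
    · exact ⟨row, rfl⟩
  obtain ⟨row, hrw⟩ := hrow
  have hcx : PySem.List.pyGet? row x = some c := by
    unfold pyGet2 at hc; rw [hrw] at hc; simpa using hc
  have hcd : PySem.List.pyGetD (PySem.List.pyGetD alMap y []) x 0 = c := by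
    rw [pyGetD_eq_of_pyGet?_some _ _ _ _ hrw]
    exact pyGetD_eq_of_pyGet?_some _ _ _ _ hcx
  unfold findDown_alt findDown
  simp only [PySem.List.enumerate, List.foldl, hc, hcd]
  by_cases hyz : y = 0 <;> by_cases hxz : x = 0
  case pos =>
    simp only [hyz, hxz]
    rcases oE : pyGet2 alMap y (x+1) with _ | vE <;>
    rcases oS : pyGet2 alMap (y+1) x with _ | vS <;>
      simp only [hyz, hxz, oE, oS, and_false, false_or, or_self, reduceCtorEq, String.reduceEq,
        false_and, and_true, if_neg, not_false_iff, List.nil_append, List.cons_append,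
        List.append_nil] <;>
      simp [PySem.List.min2?, List.foldl] <;>
      (try split_ifs) <;> (try simp_all [matchIte]) <;> try omega
    all_goals (try (split <;> simp_all))
    all_goals (try (split_ifs at * <;> simp_all))
    all_goals (try (split_ifs at * <;> simp_all))
    all_goals (try omega)
    all_goals (rename_i heq; subst heq; intro hlt; simp at hlt; exact absurd hlt (by omega))
  case neg =>
    simp only [hyz, hxz]
    rcases oW : pyGet2 alMap y (x-1) with _ | vW <;>
    rcases oE : pyGet2 alMap y (x+1) with _ | vE <;>
    rcases oS : pyGet2 alMap (y+1) x with _ | vS <;>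
      simp only [hyz, hxz, oW, oE, oS, and_false, false_or, or_self, reduceCtorEq, String.reduceEq,
        false_and, and_true, if_neg, not_false_iff, List.nil_append, List.cons_append,
        List.append_nil] <;>
      simp [PySem.List.min2?, List.foldl] <;>
      (try split_ifs) <;> (try simp_all [matchIte]) <;> try omega
    all_goals (try (split <;> simp_all))
    all_goals (try (split_ifs at * <;> simp_all))
    all_goals (try (split_ifs at * <;> simp_all))
    all_goals (try omega)
    all_goals (rename_i heq; subst heq; intro hlt; simp at hlt; exact absurd hlt (by omega))
  case pos =>
    simp only [hyz, hxz]
    rcases oN : pyGet2 alMap (y-1) x with _ | vN <;>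
    rcases oE : pyGet2 alMap y (x+1) with _ | vE <;>
    rcases oS : pyGet2 alMap (y+1) x with _ | vS <;>
      simp only [hyz, hxz, oN, oE, oS, and_false, false_or, or_self, reduceCtorEq, String.reduceEq,
        false_and, and_true, if_neg, not_false_iff, List.nil_append, List.cons_append,
        List.append_nil] <;>
      simp [PySem.List.min2?, List.foldl] <;>
      (try split_ifs) <;> (try simp_all [matchIte]) <;> try omega
    all_goals (try (split <;> simp_all))
    all_goals (try (split_ifs at * <;> simp_all))
    all_goals (try (split_ifs at * <;> simp_all))
    all_goals (try omega)
    all_goals (rename_i heq; subst heq; intro hlt; simp at hlt; exact absurd hlt (by omega))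
  case neg =>
    rcases oN : pyGet2 alMap (y-1) x with _ | vN <;>
    rcases oW : pyGet2 alMap y (x-1) with _ | vW <;>
    rcases oE : pyGet2 alMap y (x+1) with _ | vE <;>
    rcases oS : pyGet2 alMap (y+1) x with _ | vS <;>
      simp only [hyz, hxz, oN, oW, oE, oS, and_false, false_or, or_self, reduceCtorEq,
        String.reduceEq, false_and, and_true, if_neg, not_false_iff, List.nil_append,
        List.cons_append, List.append_nil] <;>
      simp [PySem.List.min2?, List.foldl] <;>
      (try split_ifs) <;> (try simp_all [matchIte]) <;> try omega
    all_goals (try (split <;> simp_all))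
    all_goals (try (split_ifs at * <;> simp_all))
    all_goals (try (split_ifs at * <;> simp_all))
    all_goals (try omega)
    all_goals (rename_i heq; subst heq; intro hlt; simp at hlt; exact absurd hlt (by omega))

set_option maxHeartbeats 4000000 in
theorem findDown_ranges (y x : Int) (alMap : List (List Int)) (h : Readable alMap y x) :
    findDown y x alMap = "" ∨
      ((findDown y x alMap = "N" ∨ findDown y x alMap = "W" ∨ findDown y x alMap = "E" ∨
          findDown y x alMap = "S") ∧
        Readable alMap (stepB y x (findDown y x alMap)).1 (stepB y x (findDown y x alMap)).2) := by
  obtain ⟨c, hc⟩ := h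
  unfold findDown
  rcases oN : pyGet2 alMap (y - 1) x with _ | vN <;>
  rcases oW : pyGet2 alMap y (x - 1) with _ | vW <;>
  rcases oE : pyGet2 alMap y (x + 1) with _ | vE <;>
  rcases oS : pyGet2 alMap (y + 1) x with _ | vS <;>
    simp only [hc, oN, oW, oE, oS] <;>
    (try split_ifs) <;>
    first
      | (left; rfl)
      | (right; constructor
         · simp
         · simp only [stepB, String.reduceEq, reduceIte, ite_true, ite_false]
           first
             | exact ⟨vN, oN⟩
             | exact ⟨vW, oW⟩
             | exact ⟨vE, oE⟩
             | exact ⟨vS, oS⟩)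

theorem loop_eq_rec (alMap : List (List Int)) (fuel : Nat) :
    ∀ (y x : Int) (stack : List (Int × Int)) (label : String) (result : List (List String)),
      Readable alMap y x →
      initFlowLoop fuel stack y x label alMap result = initFlowRec fuel y x label alMap result := by
  induction fuel with
  | zero => intro y x stack label result _; rfl
  | succ f ih =>
    intro y x stack label result hInv
    have hfd := findDown_eq y x alMap hInv
    have hr := findDown_ranges y x alMap hInv
    simp only [initFlowLoop, initFlowRec, hfd]
    rcases hr with h0 | ⟨hmem, hstep⟩
    · simp [h0]
    · rcases hmem with h | h | h | h <;>
        simp only [h, stepB, String.reduceEq, reduceIte, ite_true, ite_false] at hstep ⊢ <;>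
        [rcases o : pyGet2S result (y - 1) x with _ | s;
         rcases o : pyGet2S result y (x - 1) with _ | s;
         rcases o : pyGet2S result y (x + 1) with _ | s;
         rcases o : pyGet2S result (y + 1) x with _ | s] <;>
        simp only [o] <;>
        (try rfl) <;>
        by_cases hs : s = "" <;>
        simp only [hs, ne_eq, not_true_eq_false, not_false_eq_true, ite_true, ite_false,
          reduceIte, String.reduceEq] <;>
        first
          | rfl
          | exact ih _ _ _ label result hstep

theorem pre_readable (y x : Int) (alMap : List (List Int)) (result : List (List String))
    (label : String) (h : Pre_initFlow y x label alMap result) : Readable alMap y x := by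
  obtain ⟨h1, h2, -⟩ := h
  rcases hq : PySem.List.pyGet? alMap y with _ | row
  · rw [PySem.List.pyGet?_eq_none_iff] at hq; exact absurd h1 hq
  · have hrow : PySem.List.pyGetD alMap y [] = row := pyGetD_eq_of_pyGet?_some _ _ _ _ hq
    rw [hrow] at h2
    rcases hq2 : PySem.List.pyGet? row x with _ | v
    · rw [PySem.List.pyGet?_eq_none_iff] at hq2; exact absurd h2 hq2
    · exact ⟨v, by unfold pyGet2; rw [hq]; simpa using hq2⟩

-- ===== VERDICT (by name: the statement is the Claim_ definition above) =====
theorem initFlow_spec : Claim_equal_initFlow := by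
  intro y x label alMap result _hdom hpre
  unfold Spec_initFlow initFlow initFlow_alt
  exact loop_eq_rec alMap (sizeFuel alMap) y x [] label result
    (pre_readable y x alMap result label hpre)
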